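-- pv_equiv track=rewrite | github.com/HugoDemaret/SWERC2022 | book/notebook/code/points/rectangle_from_points.py | rectangles_from_points
-- ===== SOURCE A (Python) =====
-- def rectangles_from_points(S):
--     """
--     :param S: list of points, as coordinate pairs
--     :returns: the number of rectangles
--     """
--     answ = 0
--     pairs = {}
--     for j, _ in enumerate(S):
--         for i in range(j):      # loop over point pairs (p,q)
--             px, py = S[i]
--             qx, qy = S[j]
--             center = (px + qx, py + qy)
--             dist = (px - qx) ** 2 + (py - qy) ** 2
--             signature = (center, dist)
--             if signature in pairs:
--                 answ += len(pairs[signature])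
--                 pairs[signature].append((i, j))
--             else:
--                 pairs[signature] = [(i, j)]
--     return answ
-- ===== SOURCE B (Python) =====
-- def rectangles_from_points(S):
--     """
--     :param S: list of points, as coordinate pairs
--     :returns: the number of rectangles
--     """
--     sigs = []
--     for j, (qx, qy) in enumerate(S):
--         for i in range(j):
--             px, py = S[i]
--             sigs.append((px + qx, py + qy, (px - qx) ** 2 + (py - qy) ** 2))
--     sigs.sort()
--     answ = 0
--     run = 1
--     prev = None
--     for s in sigs:
--         if s == prev:
--             answ += run
--             run += 1
--         else:
--             run = 1
--         prev = s
--     return answ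
-- ===== Notes on version B (the rewrite author's own statement) =====
-- stated objective: alternative
-- what changed: B drops A's dict-of-index-lists with interleaved counting entirely: it collects the pair signatures into a plain list, sorts it (Python's tuple sort), and counts equal pairs in one linear run-scan over the sorted list.
import Mathlib
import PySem

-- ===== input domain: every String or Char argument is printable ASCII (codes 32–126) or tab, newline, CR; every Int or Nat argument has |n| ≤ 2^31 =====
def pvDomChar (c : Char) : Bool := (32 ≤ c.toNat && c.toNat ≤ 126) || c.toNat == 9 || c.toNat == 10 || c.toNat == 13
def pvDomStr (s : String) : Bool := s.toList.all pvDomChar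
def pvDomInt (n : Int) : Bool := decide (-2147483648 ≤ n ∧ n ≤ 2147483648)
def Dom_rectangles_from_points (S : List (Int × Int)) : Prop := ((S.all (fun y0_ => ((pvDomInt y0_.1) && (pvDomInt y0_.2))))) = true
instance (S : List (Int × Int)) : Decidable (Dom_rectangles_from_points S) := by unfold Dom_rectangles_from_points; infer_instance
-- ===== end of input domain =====

-- B replaces A's dict of (i,j) lists (with interleaved answer accumulation) by sort-then-scan:
-- collect all pair signatures in a list, sort it, count equal adjacent pairs with a run counter.

-- ===== PORT A =====
-- `S[i]` / `S[j]` are always in range here (0 ≤ i < j < len(S)), so pyGetD is exact.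
def rectangles_from_points (S : List (Int × Int)) : Int :=
  (((PySem.List.enumerate S).foldl
    (fun (st : Int × PySem.Dict ((Int × Int) × Int) (List (Int × Int))) je =>
      (PySem.List.pyRange 0 je.1).foldl
        (fun st i =>
          let p := PySem.List.pyGetD S i (0, 0)
          let q := PySem.List.pyGetD S je.1 (0, 0)
          let signature := ((p.1 + q.1, p.2 + q.2), (p.1 - q.1) ^ 2 + (p.2 - q.2) ^ 2)
          match st.2.get? signature with
          | some l => (st.1 + (l.length : Int), st.2.insert signature (l ++ [(i, je.1)]))
          | none => (st.1, st.2.insert signature [(i, je.1)]))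
        st)
    (0, PySem.Dict.empty))).1

-- ===== PORT B =====
-- Python's `<` on int 3-tuples, lexicographic (exact).
def pvLexLt (a b : Int × Int × Int) : Bool :=
  decide (a.1 < b.1) ||
    (decide (a.1 = b.1) &&
      (decide (a.2.1 < b.2.1) || (decide (a.2.1 = b.2.1) && decide (a.2.2 < b.2.2))))

-- hand port of `sigs.sort()`: a STABLE insertion sort under the lexicographic tuple order;
-- Python's sort is stable under the same total order, so the resulting list is exactly Python's.
def pvPySort (xs : List (Int × Int × Int)) : List (Int × Int × Int) :=
  xs.foldl (fun acc x => PySem.List.insertBy pvLexLt x acc) []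

def rectangles_from_points_alt (S : List (Int × Int)) : Int :=
  let sigs :=
    (PySem.List.enumerate S).foldl
      (fun (sigs : List (Int × Int × Int)) jq =>
        (PySem.List.pyRange 0 jq.1).foldl
          (fun sigs i =>
            let p := PySem.List.pyGetD S i (0, 0)
            sigs ++ [(p.1 + jq.2.1, p.2 + jq.2.2, (p.1 - jq.2.1) ^ 2 + (p.2 - jq.2.2) ^ 2)])
          sigs)
      []
  let sorted := pvPySort sigs
  -- `prev = None` start: an Option, `s == prev` is `some s = prev`
  (sorted.foldl
    (fun (st : Int × Int × Option (Int × Int × Int)) s =>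
      if some s = st.2.2 then (st.1 + st.2.1, st.2.1 + 1, some s)
      else (st.1, 1, some s))
    (0, 1, none)).1

-- ===== PRECONDITION & SPEC =====
def Spec_rectangles_from_points (S : List (Int × Int)) (out : Int) : Prop := out = rectangles_from_points_alt S
instance (S : List (Int × Int)) (out : Int) : Decidable (Spec_rectangles_from_points S out) := by unfold Spec_rectangles_from_points; infer_instance

-- ===== CLAIM (what is proved, stated in full; the proofs are below) =====
def Claim_equal_rectangles_from_points : Prop := ∀ (S : List (Int × Int)), Dom_rectangles_from_points S → Spec_rectangles_from_points S (rectangles_from_points S)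

-- ===== LEMMAS AND PROOFS =====

-- nested signature of pair (p, q) as A forms it
def pvSig (p q : Int × Int) : (Int × Int) × Int :=
  ((p.1 + q.1, p.2 + q.2), (p.1 - q.1) ^ 2 + (p.2 - q.2) ^ 2)

-- flat 3-tuple signature as B forms it
def pvSig3 (p q : Int × Int) : Int × Int × Int :=
  (p.1 + q.1, p.2 + q.2, (p.1 - q.1) ^ 2 + (p.2 - q.2) ^ 2)

-- the (signature, (i, j)) sequence A's double loop traverses, flattened
def pvSigPairs (S : List (Int × Int)) : List (((Int × Int) × Int) × (Int × Int)) :=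
  (List.range S.length).flatMap (fun j =>
    (List.range j).map (fun i => (pvSig (S.getD i (0, 0)) (S.getD j (0, 0)), ((i : Int), (j : Int)))))

def pvSigs (S : List (Int × Int)) : List ((Int × Int) × Int) := (pvSigPairs S).map (·.1)

-- the flat signature list B's double loop builds
def pvSigs3 (S : List (Int × Int)) : List (Int × Int × Int) :=
  (List.range S.length).flatMap (fun j =>
    (List.range j).map (fun i => pvSig3 (S.getD i (0, 0)) (S.getD j (0, 0))))

-- A's loop body on the flattened sequence
def pvStepA (st : Int × PySem.Dict ((Int × Int) × Int) (List (Int × Int)))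
    (sp : ((Int × Int) × Int) × (Int × Int)) :
    Int × PySem.Dict ((Int × Int) × Int) (List (Int × Int)) :=
  match st.2.get? sp.1 with
  | some l => (st.1 + (l.length : Int), st.2.insert sp.1 (l ++ [sp.2]))
  | none => (st.1, st.2.insert sp.1 [sp.2])

-- abstract view of A's dict: the length of the stored list at each signature
def pvLenD (d : PySem.Dict ((Int × Int) × Int) (List (Int × Int))) (s : (Int × Int) × Int) : Nat :=
  ((d.get? s).getD []).length

-- what A's running answer adds, given current multiplicities m
def pvCnt (m : ((Int × Int) × Int) → Nat) : List ((Int × Int) × Int) → Nat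
  | [] => 0
  | s :: L => m s + pvCnt (fun t => if t = s then m t + 1 else m t) L

-- multiplicity, written with countP so that every use shares one Boolean predicate form
def pvCount {α : Type} [DecidableEq α] (s : α) (L : List α) : Nat :=
  L.countP (fun t => decide (t = s))

-- number of equal (unordered) index pairs in a list
def pvPairs {α : Type} [DecidableEq α] : List α → Nat
  | [] => 0
  | s :: L => pvCount s L + pvPairs L

lemma pvA_flat (S : List (Int × Int)) :
    rectangles_from_points S = ((pvSigPairs S).foldl pvStepA (0, PySem.Dict.empty)).1 := by
  simp only [rectangles_from_points, pvSigPairs, List.foldl_flatMap, List.foldl_map,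
    PySem.List.enumerate_eq_map_pyRange S ((0 : Int), (0 : Int)), PySem.List.len_eq,
    PySem.List.pyRange_zero_natCast, PySem.List.pyGetD_natCast, pvStepA, pvSig]

lemma pvAfold (L : List (((Int × Int) × Int) × (Int × Int))) :
    ∀ (a : Int) d (m : ((Int × Int) × Int) → Nat), (∀ s, pvLenD d s = m s) →
      (L.foldl pvStepA (a, d)).1 = a + (pvCnt m (L.map (·.1)) : Int) := by
  induction L with
  | nil => intro a d m _; simp [pvCnt]
  | cons sp L ih =>
    intro a d m hm
    obtain ⟨s, p⟩ := sp
    simp only [List.foldl_cons, List.map_cons, pvCnt]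
    cases h : d.get? s with
    | some l =>
      have hlen : l.length = m s := by
        have := hm s; simpa [pvLenD, h] using this
      have hstep : pvStepA (a, d) (s, p) = (a + (l.length : Int), d.insert s (l ++ [p])) := by
        simp [pvStepA, h]
      rw [hstep, ih _ _ (fun t => if t = s then m t + 1 else m t) ?_]
      · simp only [hlen]; push_cast; ring
      · intro t
        by_cases ht : t = s
        · subst ht
          simp [pvLenD, PySem.Dict.get?_insert_self, hlen]
        · simp [pvLenD, PySem.Dict.get?_insert_of_ne _ _ ht, ← hm t, ht]
    | none =>
      have hz : m s = 0 := by
        have := hm s; simpa [pvLenD, h] using this.symm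
      have hstep : pvStepA (a, d) (s, p) = (a, d.insert s [p]) := by
        simp [pvStepA, h]
      rw [hstep, ih _ _ (fun t => if t = s then m t + 1 else m t) ?_]
      · simp only [hz]; push_cast; ring
      · intro t
        by_cases ht : t = s
        · subst ht
          simp [pvLenD, PySem.Dict.get?_insert_self, hz]
        · simp [pvLenD, PySem.Dict.get?_insert_of_ne _ _ ht, ← hm t, ht]

lemma pvSum_bump (s : (Int × Int) × Int) (m : ((Int × Int) × Int) → Nat)
    (L : List ((Int × Int) × Int)) :
    (L.map (fun t => if t = s then m t + 1 else m t)).sum = (L.map m).sum + pvCount s L := by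
  induction L with
  | nil => simp [pvCount]
  | cons x L ihx =>
    simp only [List.map_cons, List.sum_cons, pvCount, List.countP_cons]
    rw [ihx]
    by_cases hx : x = s
    · simp [pvCount, hx]; omega
    · simp [pvCount, hx]; omega

lemma pvCnt_eq (L : List ((Int × Int) × Int)) :
    ∀ m, pvCnt m L = (L.map m).sum + pvPairs L := by
  induction L with
  | nil => intro m; simp [pvCnt, pvPairs]
  | cons s L ih =>
    intro m
    simp only [pvCnt, pvPairs, ih, List.map_cons, List.sum_cons, pvSum_bump]
    omega

-- pvPairs is invariant under permutation (counts are)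
lemma pvPairs_perm {α : Type} [DecidableEq α] {l₁ l₂ : List α} (h : l₁.Perm l₂) :
    pvPairs l₁ = pvPairs l₂ := by
  induction h with
  | nil => rfl
  | cons x h ih => simp [pvPairs, ih, pvCount, h.countP_eq]
  | swap x y L =>
    simp only [pvPairs, pvCount, List.countP_cons]
    by_cases hxy : x = y
    · subst hxy; omega
    · have hyx : ¬ y = x := fun h => hxy h.symm
      simp [hxy, hyx]
      omega
  | trans h1 h2 ih1 ih2 => omega

-- pvPairs through an injective map
lemma pvPairs_map {α β : Type} [DecidableEq α] [DecidableEq β] (f : α → β)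
    (hf : Function.Injective f) (L : List α) : pvPairs (L.map f) = pvPairs L := by
  induction L with
  | nil => rfl
  | cons x L ih =>
    simp only [List.map_cons, pvPairs, ih, pvCount, List.countP_map]
    have hpred : ((fun t => decide (t = f x)) ∘ f) = (fun t => decide (t = x)) := by
      funext t
      simp [Function.comp, hf.eq_iff]
    rw [hpred]

-- ----- lexicographic order facts -----
lemma pvLexLt_antisymm (a b : Int × Int × Int)
    (h1 : pvLexLt a b = false) (h2 : pvLexLt b a = false) : a = b := by
  obtain ⟨a1, a2, a3⟩ := a; obtain ⟨b1, b2, b3⟩ := b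
  simp only [pvLexLt, Bool.or_eq_false_iff, Bool.and_eq_false_iff, decide_eq_false_iff_not] at h1 h2
  simp only [Prod.mk.injEq]
  omega

lemma pvLexLt_asymm (a b : Int × Int × Int) (h : pvLexLt a b = true) :
    pvLexLt b a = false := by
  obtain ⟨a1, a2, a3⟩ := a; obtain ⟨b1, b2, b3⟩ := b
  simp only [pvLexLt, Bool.or_eq_true, Bool.and_eq_true, decide_eq_true_eq] at h
  simp only [pvLexLt, Bool.or_eq_false_iff, Bool.and_eq_false_iff, decide_eq_false_iff_not]
  omega

lemma pvLexLt_trans (a b c : Int × Int × Int)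
    (h1 : pvLexLt a b = true) (h2 : pvLexLt b c = true) : pvLexLt a c = true := by
  obtain ⟨a1, a2, a3⟩ := a; obtain ⟨b1, b2, b3⟩ := b; obtain ⟨c1, c2, c3⟩ := c
  simp only [pvLexLt, Bool.or_eq_true, Bool.and_eq_true, decide_eq_true_eq] at h1 h2 ⊢
  omega

-- le relation: "not strictly greater"
def pvLe (a b : Int × Int × Int) : Prop := pvLexLt b a = false

lemma pv_insertBy_perm (x : Int × Int × Int) (ys : List (Int × Int × Int)) :
    (PySem.List.insertBy pvLexLt x ys).Perm (x :: ys) := by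
  induction ys with
  | nil => simp [PySem.List.insertBy]
  | cons y ys ih =>
    simp only [PySem.List.insertBy]
    by_cases h : pvLexLt x y = true
    · simp [h]
    · simp only [h]
      exact (ih.cons y).trans (List.Perm.swap x y ys)

lemma pv_insertBy_pairwise (x : Int × Int × Int) (ys : List (Int × Int × Int))
    (h : ys.Pairwise pvLe) : (PySem.List.insertBy pvLexLt x ys).Pairwise pvLe := by
  induction ys with
  | nil => simp [PySem.List.insertBy]
  | cons y ys ih =>
    rcases List.pairwise_cons.mp h with ⟨hy, hys⟩
    simp only [PySem.List.insertBy]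
    by_cases hxy : pvLexLt x y = true
    · simp only [hxy, if_true]
      refine List.pairwise_cons.mpr ⟨?_, h⟩
      intro z hz
      rcases List.mem_cons.mp hz with rfl | hz
      · exact pvLexLt_asymm x _ hxy
      · -- pvLe x z: if z < x then z < y, contradicting pvLe y z
        have hyz := hy z hz
        unfold pvLe at hyz ⊢
        by_cases hzx : pvLexLt z x = true
        · have := pvLexLt_trans z x y hzx hxy
          rw [this] at hyz; cases hyz
        · simpa using hzx
    · simp only [hxy]
      refine List.pairwise_cons.mpr ⟨?_, ih hys⟩
      intro z hz
      rcases (PySem.List.mem_insertBy pvLexLt x z ys).mp hz with hz | hz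
      · subst hz
        unfold pvLe
        simpa using hxy
      · exact hy z hz

lemma pvPySort_perm (xs : List (Int × Int × Int)) : (pvPySort xs).Perm xs := by
  suffices h : ∀ (acc : List (Int × Int × Int)),
      (xs.foldl (fun acc x => PySem.List.insertBy pvLexLt x acc) acc).Perm (xs ++ acc) by
    simpa [pvPySort] using h []
  induction xs with
  | nil => intro acc; simp
  | cons x xs ih =>
    intro acc
    simp only [List.foldl_cons, List.cons_append]
    refine (ih _).trans ?_
    have h1 : (xs ++ PySem.List.insertBy pvLexLt x acc).Perm (xs ++ (x :: acc)) :=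
      List.Perm.append_left xs (pv_insertBy_perm x acc)
    exact h1.trans List.perm_middle

lemma pvPySort_pairwise (xs : List (Int × Int × Int)) : (pvPySort xs).Pairwise pvLe := by
  suffices h : ∀ (acc : List (Int × Int × Int)), acc.Pairwise pvLe →
      (xs.foldl (fun acc x => PySem.List.insertBy pvLexLt x acc) acc).Pairwise pvLe by
    exact h [] List.Pairwise.nil
  induction xs with
  | nil => intro acc hacc; simpa
  | cons x xs ih =>
    intro acc hacc
    exact ih _ (pv_insertBy_pairwise x acc hacc)

-- B's scan step
def pvScanStep (st : Int × Int × Option (Int × Int × Int)) (s : Int × Int × Int) :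
    Int × Int × Option (Int × Int × Int) :=
  if some s = st.2.2 then (st.1 + st.2.1, st.2.1 + 1, some s) else (st.1, 1, some s)

-- run-scan invariant over a sorted tail: the answer accumulates pvPairs plus r copies of p's count
lemma pvScan_go (L : List (Int × Int × Int)) :
    ∀ (p : Int × Int × Int) (a r : Int), L.Pairwise pvLe → (∀ x ∈ L, pvLe p x) →
      (L.foldl pvScanStep (a, r, some p)).1 = a + (pvPairs L : Int) + r * (pvCount p L : Int) := by
  induction L with
  | nil => intro p a r _ _; simp [pvPairs]
  | cons x L ih =>
    intro p a r hpw hp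
    rcases List.pairwise_cons.mp hpw with ⟨hx, hL⟩
    have hxmem : ∀ y ∈ L, pvLe x y := hx
    simp only [List.foldl_cons]
    by_cases hxp : x = p
    · subst hxp
      have hstep : pvScanStep (a, r, some x) x = (a + r, r + 1, some x) := by
        simp [pvScanStep]
      rw [hstep, ih x (a + r) (r + 1) hL hxmem]
      have hcc : pvCount x (x :: L) = pvCount x L + 1 := by
        simp [pvCount]
      rw [pvPairs, hcc]
      push_cast
      ring
    · have hstep : pvScanStep (a, r, some p) x = (a, 1, some x) := by
        simp [pvScanStep, Ne.symm, hxp]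
      rw [hstep, ih x a 1 hL hxmem]
      -- p does not occur in L: p ≤ x, x ≤ y for y ∈ L, so p ∈ L would force p = x
      have hnotin : p ∉ L := by
        intro hmem
        have h1 : pvLe p x := hp x (List.mem_cons_self ..)
        have h2 : pvLe x p := hx p hmem
        exact hxp (pvLexLt_antisymm x p h1 h2)
      have hc0 : pvCount p L = 0 := by
        simp only [pvCount, List.countP_eq_zero]
        intro y hy
        simp only [decide_eq_true_eq]
        intro h; exact hnotin (h ▸ hy)
      have hcx : pvCount p (x :: L) = 0 := by
        simp only [pvCount, List.countP_cons] at hc0 ⊢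
        simp [hc0, hxp]
      rw [pvPairs, hcx]
      push_cast
      ring

-- the whole scan computes pvPairs of a sorted list
lemma pvScan_eq (L : List (Int × Int × Int)) (h : L.Pairwise pvLe) :
    (L.foldl pvScanStep (0, 1, none)).1 = (pvPairs L : Int) := by
  cases L with
  | nil => simp [pvPairs]
  | cons x L =>
    rcases List.pairwise_cons.mp h with ⟨hx, hL⟩
    have hstep : pvScanStep (0, 1, none) x = (0, 1, some x) := by
      simp [pvScanStep]
    simp only [List.foldl_cons, hstep]
    rw [pvScan_go L x 0 1 hL hx]
    simp [pvPairs]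
    ring

-- flatMap of singletons is map
lemma pvSingle {alpha beta : Type} (f : alpha → beta) (l : List alpha) :
    List.flatMap (fun i => [f i]) l = l.map f := by
  induction l with
  | nil => rfl
  | cons a l ih => simp [List.flatMap_cons, ih]

-- B's builder produces pvSigs3
lemma pvB_sigs (S : List (Int × Int)) :
    (PySem.List.enumerate S).foldl
      (fun (sigs : List (Int × Int × Int)) jq =>
        (PySem.List.pyRange 0 jq.1).foldl
          (fun sigs i =>
            let p := PySem.List.pyGetD S i (0, 0)
            sigs ++ [(p.1 + jq.2.1, p.2 + jq.2.2, (p.1 - jq.2.1) ^ 2 + (p.2 - jq.2.2) ^ 2)])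
          sigs)
      [] = pvSigs3 S := by
  simp only [PySem.List.enumerate_eq_map_pyRange S ((0 : Int), (0 : Int)), PySem.List.len_eq,
    PySem.List.pyRange_zero_natCast, List.foldl_map, PySem.List.pyGetD_natCast]
  simp only [PySem.List.foldl_append_eq_flatMap]
  simp [pvSigs3, pvSig3, pvSingle]

lemma pvB_eq (S : List (Int × Int)) :
    rectangles_from_points_alt S = (pvPairs (pvSigs3 S) : Int) := by
  show ((pvPySort ((PySem.List.enumerate S).foldl _ [])).foldl pvScanStep (0, 1, none)).1 = _
  rw [pvB_sigs]
  rw [pvScan_eq _ (pvPySort_pairwise (pvSigs3 S))]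
  rw [pvPairs_perm (pvPySort_perm (pvSigs3 S))]

-- ===== VERDICT (by name: the statement is the Claim_ definition above) =====
theorem rectangles_from_points_spec : Claim_equal_rectangles_from_points := by
  intro S _
  unfold Spec_rectangles_from_points
  have hA : rectangles_from_points S = (pvPairs (pvSigs S) : Int) := by
    rw [pvA_flat, pvAfold (pvSigPairs S) 0 PySem.Dict.empty (fun _ => 0) (fun s => rfl),
      pvCnt_eq]
    simp [Function.comp_def, pvSigs]
  have hsig : pvSigs S = (pvSigs3 S).map (fun t => ((t.1, t.2.1), t.2.2)) := by
    simp [pvSigs, pvSigs3, pvSigPairs, List.map_flatMap, List.map_map, Function.comp_def,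
      pvSig, pvSig3]
  have hinj : Function.Injective (fun t : Int × Int × Int => ((t.1, t.2.1), t.2.2)) := by
    intro a b h
    obtain ⟨a1, a2, a3⟩ := a; obtain ⟨b1, b2, b3⟩ := b
    simpa [Prod.ext_iff, and_assoc] using h
  rw [hA, pvB_eq, hsig, pvPairs_map _ hinj]
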